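-- pv_equiv track=rewrite | github.com/tsinghua-fib-lab/Cam-Traj-Rec | main/run.py | cut_distant_points
-- ===== SOURCE A (Python) =====
-- TM_GAP_GATE = 720
--
-- def cut_distant_points(points, tm_gap_gate=TM_GAP_GATE):
--     cut_points = []
--     one_cut = [points[0]]
--     tm_last = points[0][1]
--     for point in points[1:]:
--         tm = point[1]
--         if tm - tm_last > tm_gap_gate:
--             cut_points.append(one_cut)
--             one_cut = [point]
--         else:
--             one_cut.append(point)
--         tm_last = tm
--     cut_points.append(one_cut)
--     return cut_points
-- ===== SOURCE B (Python) =====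
-- TM_GAP_GATE = 720
--
-- def cut_distant_points(points, tm_gap_gate=TM_GAP_GATE):
--     n = len(points)
--     breaks = [i for i in range(1, n) if points[i][1] - points[i - 1][1] > tm_gap_gate]
--     bounds = [0] + breaks + [n]
--     return [points[a:b] for a, b in zip(bounds, bounds[1:])]
-- ===== Notes on version B (the rewrite author's own statement) =====
-- stated objective: alternative
-- what changed: B first computes the list of break indices (where consecutive time gaps exceed the gate) in one comprehension, then slices the input between consecutive boundaries, instead of incrementally appending points to a running segment with mutable state.
-- outside the precondition, e.g. on cut_distant_points([], 720): A raises IndexError, B returns [[]]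
import Mathlib
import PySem

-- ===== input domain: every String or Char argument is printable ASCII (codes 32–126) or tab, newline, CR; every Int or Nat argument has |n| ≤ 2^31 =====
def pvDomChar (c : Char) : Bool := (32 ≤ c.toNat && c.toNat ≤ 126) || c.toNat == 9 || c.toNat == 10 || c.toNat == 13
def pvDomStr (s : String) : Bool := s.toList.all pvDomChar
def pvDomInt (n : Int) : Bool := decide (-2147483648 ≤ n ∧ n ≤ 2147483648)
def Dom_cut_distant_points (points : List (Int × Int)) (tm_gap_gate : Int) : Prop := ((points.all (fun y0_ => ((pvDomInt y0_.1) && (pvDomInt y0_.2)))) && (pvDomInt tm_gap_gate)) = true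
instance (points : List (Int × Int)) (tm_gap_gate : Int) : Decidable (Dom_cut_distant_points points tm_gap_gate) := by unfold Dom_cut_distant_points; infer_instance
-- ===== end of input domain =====

-- B computes the break indices first and then slices the list between consecutive
-- boundaries, instead of A's incremental scan with a running segment ("alternative").

-- ===== PORT A =====
def cut_distant_points (points : List (Int × Int)) (tm_gap_gate : Int) : List (List (Int × Int)) :=
  match points with
  | [] => []   -- Python raises IndexError here (points[0]); excluded by Pre_
  | p0 :: rest =>
    let s := rest.foldl
      (fun (st : List (List (Int × Int)) × List (Int × Int) × Int) point =>
        if point.2 - st.2.2 > tm_gap_gate then (st.1 ++ [st.2.1], [point], point.2)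
        else (st.1, st.2.1 ++ [point], point.2))
      ([], [p0], p0.2)
    s.1 ++ [s.2.1]

-- ===== PORT B =====
-- pyGetD with default (0,0) is exact here: every index i drawn from range(1, n)
-- satisfies 1 ≤ i < n, so both i and i-1 are in range.
def cut_distant_points_alt (points : List (Int × Int)) (tm_gap_gate : Int) : List (List (Int × Int)) :=
  let n : Int := points.length
  let breaks := (PySem.List.pyRange 1 n 1).filter
    (fun i => decide ((PySem.List.pyGetD points i (0, 0)).2
                        - (PySem.List.pyGetD points (i - 1) (0, 0)).2 > tm_gap_gate))
  let bounds := (0 : Int) :: breaks ++ [n]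
  (bounds.zip bounds.tail).map (fun ab => PySem.List.slice points (some ab.1) (some ab.2))

-- ===== PRECONDITION & SPEC =====
-- Pre_ excludes only the empty list, on which A raises IndexError.
def Pre_cut_distant_points (points : List (Int × Int)) (tm_gap_gate : Int) : Prop := points ≠ []
instance (points : List (Int × Int)) (tm_gap_gate : Int) : Decidable (Pre_cut_distant_points points tm_gap_gate) := by unfold Pre_cut_distant_points; infer_instance
def pvWitness_cut_distant_points : (List (Int × Int)) × Int := ([(1, 10), (2, 20), (3, 2000)], 720)

def Spec_cut_distant_points (points : List (Int × Int)) (tm_gap_gate : Int) (out : List (List (Int × Int))) : Prop := out = cut_distant_points_alt points tm_gap_gate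
instance (points : List (Int × Int)) (tm_gap_gate : Int) (out : List (List (Int × Int))) : Decidable (Spec_cut_distant_points points tm_gap_gate out) := by unfold Spec_cut_distant_points; infer_instance

-- ===== CLAIM (what is proved, stated in full; the proofs are below) =====
def Claim_equal_cut_distant_points : Prop := ∀ (points : List (Int × Int)) (tm_gap_gate : Int), Dom_cut_distant_points points tm_gap_gate → Pre_cut_distant_points points tm_gap_gate → Spec_cut_distant_points points tm_gap_gate (cut_distant_points points tm_gap_gate)
-- ===== LEMMAS AND PROOFS =====

-- A's loop, written as structural recursion on the remaining points:
-- `attach g t oc rs` finishes the scan with current segment `oc` and last time `t`.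
def attach (g t : Int) (oc : List (Int × Int)) : List (Int × Int) → List (List (Int × Int))
  | [] => [oc]
  | q :: rs => if q.2 - t > g then oc :: attach g q.2 [q] rs else attach g q.2 (oc ++ [q]) rs

-- B's slicing step, abstracted over the boundary list.
def mapSlices (pts : List (Int × Int)) (bs : List Int) : List (List (Int × Int)) :=
  (bs.zip bs.tail).map (fun ab => PySem.List.slice pts (some ab.1) (some ab.2))

theorem mapSlices_cons (pts : List (Int × Int)) (a b : Int) (tl : List Int) :
    mapSlices pts (a :: b :: tl) = PySem.List.slice pts (some a) (some b) :: mapSlices pts (b :: tl) := by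
  simp [mapSlices, List.zip]

-- A's foldl equals `attach`, with the already-finished segments as a prefix.
theorem fold_eq_attach (g : Int) :
    ∀ (rest : List (Int × Int)) (cp : List (List (Int × Int))) (oc : List (Int × Int)) (t : Int),
      (let s := rest.foldl
        (fun (st : List (List (Int × Int)) × List (Int × Int) × Int) point =>
          if point.2 - st.2.2 > g then (st.1 ++ [st.2.1], [point], point.2)
          else (st.1, st.2.1 ++ [point], point.2)) (cp, oc, t)
       s.1 ++ [s.2.1]) = cp ++ attach g t oc rest := by
  intro rest
  induction rest with
  | nil => intro cp oc t; simp [attach]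
  | cons q rs ih =>
    intro cp oc t
    simp only [List.foldl_cons, attach]
    by_cases h : q.2 - t > g
    · simp only [if_pos h]; rw [ih]; simp
    · simp only [if_neg h]; rw [ih]

def brk (pts : List (Int × Int)) (g : Int) (i : Int) : Bool :=
  decide ((PySem.List.pyGetD pts i (0, 0)).2 - (PySem.List.pyGetD pts (i - 1) (0, 0)).2 > g)

-- Main invariant: finishing the scan at position k (current segment = pts[j:k],
-- last time = pts[k-1].2) yields the slices between the remaining boundaries.
theorem attach_eq_slices (pts : List (Int × Int)) (g : Int) :
    ∀ (m k j : Nat), pts.length - k = m → j < k → k ≤ pts.length →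
      attach g (pts.getD (k - 1) (0, 0)).2 ((pts.drop j).take (k - j)) (pts.drop k)
        = mapSlices pts ((j : Int) :: (PySem.List.pyRange k pts.length 1).filter (brk pts g) ++ [(pts.length : Int)]) := by
  intro m
  induction m with
  | zero =>
    intro k j hm hjk hk
    have hkn : k = pts.length := by omega
    subst hkn
    rw [PySem.List.pyRange_one_eq_nil (le_refl _)]
    simp only [List.filter_nil, List.drop_length, attach, mapSlices]
    simp [List.zip, PySem.List.slice_natCast]
  | succ m ih =>
    intro k j hm hjk hk
    have hkn : k < pts.length := by omega
    have hdrop : pts.drop k = pts[k] :: pts.drop (k + 1) := by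
      rw [List.drop_eq_getElem_cons hkn]
    have hgetk : PySem.List.pyGetD pts (k : Int) (0, 0) = pts[k] := by
      rw [PySem.List.pyGetD_natCast]; exact List.getD_eq_getElem _ _ hkn
    have hgetk1 : PySem.List.pyGetD pts ((k : Int) - 1) (0, 0) = pts.getD (k - 1) (0, 0) := by
      have : (k : Int) - 1 = ((k - 1 : Nat) : Int) := by omega
      rw [this, PySem.List.pyGetD_natCast]
    have hbrk : brk pts g (k : Int)
        = decide (pts[k].2 - (pts.getD (k - 1) (0, 0)).2 > g) := by
      simp [brk, hgetk, hgetk1]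
    rw [hdrop]
    rw [PySem.List.pyRange_one_cons (by exact_mod_cast hkn)]
    have hrange : ((k : Int) + 1) = ((k + 1 : Nat) : Int) := by push_cast; ring
    simp only [attach, List.filter_cons]
    by_cases hc : pts[k].2 - (pts.getD (k - 1) (0, 0)).2 > g
    · rw [if_pos hc, hbrk, if_pos (by simpa using hc)]
      have hseg : [pts[k]] = (pts.drop k).take (k + 1 - k) := by
        rw [show k + 1 - k = 1 from by omega, hdrop, List.take_one]
        simp [List.getElem?_eq_getElem hkn]
      have hget' : pts[k].2 = (pts.getD (k + 1 - 1) (0, 0)).2 := by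
        rw [show pts.getD (k + 1 - 1) (0, 0) = pts[k] from List.getD_eq_getElem _ _ hkn]
      rw [hseg, hget', ih (k + 1) k (by omega) (by omega) (by omega)]
      simp only [List.cons_append, hrange, mapSlices_cons, PySem.List.slice_natCast]
    · rw [if_neg hc, hbrk, if_neg (by simpa using hc)]
      have hseg : (pts.drop j).take (k - j) ++ [pts[k]] = (pts.drop j).take (k + 1 - j) := by
        have h1 : k + 1 - j = (k - j) + 1 := by omega
        rw [h1, List.take_add_one]
        have h2 : (pts.drop j)[k - j]? = some pts[k] := by
          rw [List.getElem?_drop]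
          have h3 : j + (k - j) = k := by omega
          rw [h3, List.getElem?_eq_getElem hkn]
        rw [h2]; rfl
      have hget' : pts[k].2 = (pts.getD (k + 1 - 1) (0, 0)).2 := by
        rw [show pts.getD (k + 1 - 1) (0, 0) = pts[k] from List.getD_eq_getElem _ _ hkn]
      rw [hseg, hget', ih (k + 1) j (by omega) (by omega) (by omega), hrange]

-- ===== VERDICT (by name: the statement is the Claim_ definition above) =====
theorem cut_distant_points_spec : Claim_equal_cut_distant_points := by
  intro points g _ hpre
  unfold Spec_cut_distant_points
  match points with
  | [] => exact absurd rfl hpre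
  | p0 :: rest =>
    show (let s := rest.foldl _ ([], [p0], p0.2); s.1 ++ [s.2.1]) = _
    rw [fold_eq_attach g rest [] [p0] p0.2, List.nil_append]
    have key := attach_eq_slices (p0 :: rest) g ((p0 :: rest).length - 1) 1 0 rfl
      (by omega) (by simp)
    exact key
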